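-- pv_equiv track=rewrite | github.com/skyfireitdiy/Jarvis | src/jarvis/jarvis_sec/checkers/c_checker.py | _has_len_bound_around
-- ===== SOURCE A (Python) =====
-- from typing import List
-- from typing import Sequence
-- from typing import Tuple
--
-- def _safe_line(lines: Sequence[str], idx: int) -> str:
--     if 1 <= idx <= len(lines):
--         return lines[idx - 1]
--     return ""
--
-- def _window(
--     lines: Sequence[str], center: int, before: int = 3, after: int = 3
-- ) -> List[Tuple[int, str]]:
--     start = max(1, center - before)
--     end = min(len(lines), center + after)
--     return [(i, _safe_line(lines, i)) for i in range(start, end + 1)]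
--
-- def _has_len_bound_around(lines: Sequence[str], line_no: int, radius: int = 3) -> bool:
--     for _, s in _window(lines, line_no, before=radius, after=radius):
--         # 检测是否出现长度上界/检查（非常粗略）
--         if any(
--             k in s
--             for k in [
--                 "sizeof(",
--                 "BUFFER_SIZE",
--                 "MAX_",
--                 "min(",
--                 "clamp(",
--                 "snprintf",
--                 "strlcpy",
--                 "strlcat",
--             ]
--         ):
--             return True
--     return False
-- ===== SOURCE B (Python) =====
-- _KEYWORDS = [
--     "sizeof(",
--     "BUFFER_SIZE",
--     "MAX_",
--     "min(",
--     "clamp(",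
--     "snprintf",
--     "strlcpy",
--     "strlcat",
-- ]
--
-- # dispatch table: first character -> keywords starting with it
-- _HEAD = {}
-- for _k in _KEYWORDS:
--     _HEAD.setdefault(_k[0], []).append(_k)
--
--
-- def _has_len_bound_around(lines, line_no, radius=3):
--     lo = max(1, line_no - radius) - 1
--     hi = max(0, min(len(lines), line_no + radius))
--     for s in lines[lo:hi]:
--         for i, c in enumerate(s):
--             for k in _HEAD.get(c, ()):
--                 if s.startswith(k, i):
--                     return True
--     return False
-- ===== Notes on version B (the rewrite author's own statement) =====
-- stated objective: alternative
-- what changed: Replaces the per-line window of (index, _safe_line) pairs with a nested per-keyword substring scan by a clamped slice scanned character by character, using a first-character dispatch table (dict from first char to keywords) and a positioned startswith check, so the per-keyword full-line substring scans disappear.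
import Mathlib
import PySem

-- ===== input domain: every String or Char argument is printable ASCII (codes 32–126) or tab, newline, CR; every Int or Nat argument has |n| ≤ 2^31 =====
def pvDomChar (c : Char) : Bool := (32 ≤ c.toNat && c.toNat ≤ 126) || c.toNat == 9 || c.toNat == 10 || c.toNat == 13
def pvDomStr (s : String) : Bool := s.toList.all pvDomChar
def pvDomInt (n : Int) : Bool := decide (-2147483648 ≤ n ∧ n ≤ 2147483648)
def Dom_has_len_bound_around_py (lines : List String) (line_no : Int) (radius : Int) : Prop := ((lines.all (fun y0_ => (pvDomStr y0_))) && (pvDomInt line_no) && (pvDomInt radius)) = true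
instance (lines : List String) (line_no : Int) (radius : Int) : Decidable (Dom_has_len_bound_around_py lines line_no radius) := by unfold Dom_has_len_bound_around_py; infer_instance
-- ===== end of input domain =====

-- B replaces A's per-line window plus nested per-keyword substring scans by a clamped
-- slice scanned character by character through a first-character dispatch table with a
-- positioned prefix check (objective: alternative).

-- ===== PORT A =====
def pvKeywords : List String :=
  ["sizeof(", "BUFFER_SIZE", "MAX_", "min(", "clamp(", "snprintf", "strlcpy", "strlcat"]

def safe_line_py (lines : List String) (idx : Int) : String :=
  if 1 ≤ idx ∧ idx ≤ (lines.length : Int) then PySem.List.pyGetD lines (idx - 1) ""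
  else ""

def window_py (lines : List String) (center : Int) (before : Int) (after : Int) :
    List (Int × String) :=
  let start := max 1 (center - before)
  let end_ := min ((lines.length : Int)) (center + after)
  (PySem.List.pyRange start (end_ + 1) 1).map (fun i => (i, safe_line_py lines i))

def has_len_bound_around_py (lines : List String) (line_no : Int) (radius : Int) : Bool :=
  (window_py lines line_no radius radius).any (fun p =>
    pvKeywords.any (fun k => PySem.Str.isIn k p.2))

-- ===== PORT B =====
-- module-level dispatch dict: _HEAD.setdefault(k[0], []).append(k) over the keywords
def pvHead : PySem.Dict Char (List String) :=
  pvKeywords.foldl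
    (fun d k => d.insert (k.toList.headD ' ') (d.getD (k.toList.headD ' ') [] ++ [k]))
    PySem.Dict.empty

def has_len_bound_around_py_alt (lines : List String) (line_no : Int) (radius : Int) : Bool :=
  let lo := max 1 (line_no - radius) - 1
  let hi := max 0 (min ((lines.length : Int)) (line_no + radius))
  (PySem.List.slice lines (some lo) (some hi)).any (fun s =>
    (PySem.List.enumerate s.toList 0).any (fun p =>
      (pvHead.getD p.2 []).any (fun k =>
        -- s.startswith(k, i): exact for the 0 ≤ i < len(s) produced by enumerate
        List.isPrefixOf k.toList (s.toList.drop p.1.toNat))))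

-- ===== PRECONDITION & SPEC =====
def Spec_has_len_bound_around_py (lines : List String) (line_no : Int) (radius : Int) (out : Bool) : Prop := out = has_len_bound_around_py_alt lines line_no radius
instance (lines : List String) (line_no : Int) (radius : Int) (out : Bool) : Decidable (Spec_has_len_bound_around_py lines line_no radius out) := by unfold Spec_has_len_bound_around_py; infer_instance

-- ===== CLAIM =====
def Claim_equal_has_len_bound_around_py : Prop := ∀ (lines : List String) (line_no : Int) (radius : Int), Dom_has_len_bound_around_py lines line_no radius → Spec_has_len_bound_around_py lines line_no radius (has_len_bound_around_py lines line_no radius)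

-- ===== LEMMAS AND PROOFS =====

-- the dispatch table as a literal
theorem pvHeadEq : pvHead = PySem.Dict.mk
    [('s', ["sizeof(", "snprintf", "strlcpy", "strlcat"]),
     ('B', ["BUFFER_SIZE"]), ('M', ["MAX_"]), ('m', ["min("]), ('c', ["clamp("])] := by
  decide

-- lookup in the dispatch table = "a keyword whose first character is c"
theorem pvHeadMem (c : Char) (k : String) :
    k ∈ pvHead.getD c [] ↔ k ∈ pvKeywords ∧ k.toList.headD ' ' = c := by
  rw [pvHeadEq, PySem.Dict.getD_eq_get?_getD]
  simp only [PySem.Dict.get?_mk_cons]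
  by_cases h1 : ('s' : Char) = c
  · subst h1
    rw [if_pos (by decide), Option.getD_some]
    constructor
    · intro h; fin_cases h <;> exact ⟨by decide, by decide⟩
    · rintro ⟨hk, hh⟩; fin_cases hk <;> revert hh <;> decide
  by_cases h2 : ('B' : Char) = c
  · subst h2
    rw [if_neg (by decide), if_pos (by decide), Option.getD_some]
    constructor
    · intro h; fin_cases h <;> exact ⟨by decide, by decide⟩
    · rintro ⟨hk, hh⟩; fin_cases hk <;> revert hh <;> decide
  by_cases h3 : ('M' : Char) = c
  · subst h3
    rw [if_neg (by decide), if_neg (by decide), if_pos (by decide), Option.getD_some]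
    constructor
    · intro h; fin_cases h <;> exact ⟨by decide, by decide⟩
    · rintro ⟨hk, hh⟩; fin_cases hk <;> revert hh <;> decide
  by_cases h4 : ('m' : Char) = c
  · subst h4
    rw [if_neg (by decide), if_neg (by decide), if_neg (by decide), if_pos (by decide),
      Option.getD_some]
    constructor
    · intro h; fin_cases h <;> exact ⟨by decide, by decide⟩
    · rintro ⟨hk, hh⟩; fin_cases hk <;> revert hh <;> decide
  by_cases h5 : ('c' : Char) = c
  · subst h5
    rw [if_neg (by decide), if_neg (by decide), if_neg (by decide), if_neg (by decide),
      if_pos (by decide), Option.getD_some]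
    constructor
    · intro h; fin_cases h <;> exact ⟨by decide, by decide⟩
    · rintro ⟨hk, hh⟩; fin_cases hk <;> revert hh <;> decide
  rw [if_neg (by simpa using h1), if_neg (by simpa using h2), if_neg (by simpa using h3),
      if_neg (by simpa using h4), if_neg (by simpa using h5)]
  simp only [PySem.Dict.get?]
  constructor
  · intro h; simp at h
  · rintro ⟨hk, hh⟩
    exfalso
    fin_cases hk <;> simp_all

-- every keyword is nonempty
theorem pvKeywordsNe : ∀ k ∈ pvKeywords, k.toList ≠ [] := by decide

-- B's per-line character scan = A's per-keyword substring test
theorem pvLineScan (s : String) :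
    ((PySem.List.enumerate s.toList 0).any (fun p =>
      (pvHead.getD p.2 []).any (fun k =>
        List.isPrefixOf k.toList (s.toList.drop p.1.toNat))))
    = pvKeywords.any (fun k => PySem.Str.isIn k s) := by
  rw [Bool.eq_iff_iff]
  simp only [List.any_eq_true]
  constructor
  · rintro ⟨p, hp, k, hk, hpre⟩
    rcases (PySem.List.mem_enumerate_iff _ _ _).mp hp with ⟨j, hj, rfl⟩
    obtain ⟨hkw, -⟩ := (pvHeadMem _ k).mp hk
    refine ⟨k, hkw, ?_⟩
    rw [PySem.Str.isIn_iff_infix, ← PySem.Chars.isIn_iff_infix, ← PySem.Chars.exists_prefix_drop_iff_isIn]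
    exact ⟨(0 + (j : Int)).toNat, List.isPrefixOf_iff_prefix.mp hpre⟩
  · rintro ⟨k, hk, hin⟩
    rw [PySem.Str.isIn_iff_infix, ← PySem.Chars.isIn_iff_infix, ← PySem.Chars.exists_prefix_drop_iff_isIn] at hin
    rcases hin with ⟨j, hpre⟩
    have hkne : k.toList ≠ [] := pvKeywordsNe k hk
    rcases hk0 : k.toList with _ | ⟨kc, kt⟩
    · exact absurd hk0 hkne
    have hlt : j < s.toList.length := by
      by_contra h
      have : s.toList.drop j = [] := List.drop_eq_nil_of_le (by omega)
      rw [this, hk0] at hpre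
      exact absurd (List.eq_nil_of_prefix_nil hpre) (by simp)
    have hc : s.toList[j] = kc := by
      rw [hk0] at hpre
      rcases hpre with ⟨t, ht⟩
      have : s.toList.drop j = kc :: (kt ++ t) := by rw [← ht]; simp
      have h0 : (s.toList.drop j)[0]'(by rw [this]; simp) = kc := by simp [this]
      rwa [List.getElem_drop] at h0
    refine ⟨((0 : Int) + (j : Int), s.toList[j]), (PySem.List.mem_enumerate_iff _ _ _).mpr ⟨j, hlt, rfl⟩,
      k, (pvHeadMem _ k).mpr ⟨hk, by rw [hk0, hc]; rfl⟩, ?_⟩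
    have : ((0 : Int) + (j : Int)).toNat = j := by omega
    rw [this]
    exact List.isPrefixOf_iff_prefix.mpr hpre

-- membership in the clamped slice of lines, phrased through indices
theorem pvMemSlice (lines : List String) (p q : Nat) (s : String) :
    s ∈ PySem.List.slice lines (some (p : Int)) (some (q : Int)) ↔
      ∃ j : Nat, j < q - p ∧ ∃ h : p + j < lines.length, lines[p + j] = s := by
  rw [PySem.List.slice_natCast]
  constructor
  · intro hm
    rcases List.mem_iff_getElem.mp hm with ⟨j, hj, hget⟩
    have hlen : (List.take (q - p) (List.drop p lines)).length =
        min (q - p) (lines.length - p) := by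
      simp [List.length_take, List.length_drop]
    rw [hlen] at hj
    have hpj : p + j < lines.length := by omega
    refine ⟨j, by omega, hpj, ?_⟩
    have : (List.take (q - p) (List.drop p lines))[j] = lines[p + j] := by
      rw [List.getElem_take, List.getElem_drop]
    rw [this] at hget; exact hget
  · rintro ⟨j, hjq, hpj, hget⟩
    refine List.mem_iff_getElem.mpr ⟨j, ?_, ?_⟩
    · simp [List.length_take, List.length_drop]; omega
    · rw [List.getElem_take, List.getElem_drop]; exact hget

-- _safe_line on an in-range 1-based index is plain 0-based indexing
theorem pvSafeLineGet (lines : List String) (i : Int) (m : Nat) (hm : i - 1 = (m : Int))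
    (hlt : m < lines.length) (h1 : (1 : Int) ≤ i) (h2 : i ≤ (lines.length : Int)) :
    safe_line_py lines i = lines[m] := by
  unfold safe_line_py
  rw [if_pos ⟨h1, h2⟩, hm, PySem.List.pyGetD_natCast, List.getD_eq_getElem?_getD,
    List.getElem?_eq_getElem hlt, Option.getD_some]

-- ===== VERDICT =====
theorem has_len_bound_around_py_spec : Claim_equal_has_len_bound_around_py := by
  intro lines c r _
  unfold Spec_has_len_bound_around_py
  simp only [has_len_bound_around_py, has_len_bound_around_py_alt, window_py]
  set p : Nat := (max 1 (c - r) - 1).toNat with hp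
  set q : Nat := (max 0 (min ((lines.length : Int)) (c + r))).toNat with hq
  have e1 : max 1 (c - r) - 1 = ((p : Nat) : Int) := by omega
  have e2 : max 0 (min ((lines.length : Int)) (c + r)) = ((q : Nat) : Int) := by omega
  rw [e1, e2, Bool.eq_iff_iff]
  simp only [List.any_eq_true]
  constructor
  · -- A found a hit in its window → B's character scan finds it on that slice line
    rintro ⟨pr, hmem, k, hk, hkin⟩
    rcases List.mem_map.mp hmem with ⟨j, hj, rfl⟩
    dsimp only at hkin
    have hjr := PySem.List.mem_pyRange_one.mp hj
    have hj1 : (1 : Int) ≤ j := le_trans (le_max_left 1 _) hjr.1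
    have hjn : j ≤ (lines.length : Int) := le_trans (by omega) (min_le_left _ (c + r))
    have hpjlt : p + (j - 1 - p).toNat < lines.length := by omega
    have hline : safe_line_py lines j = lines[p + (j - 1 - p).toNat]'hpjlt :=
      pvSafeLineGet lines j _ (by push_cast; omega) hpjlt hj1 hjn
    refine ⟨lines[p + (j - 1 - p).toNat]'hpjlt,
      (pvMemSlice lines p q _).mpr ⟨(j - 1 - p).toNat, by omega, hpjlt, rfl⟩, ?_⟩
    have := pvLineScan (lines[p + (j - 1 - p).toNat]'hpjlt)
    rw [Bool.eq_iff_iff] at this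
    simp only [List.any_eq_true] at this
    exact this.mpr ⟨k, hk, by rwa [hline] at hkin⟩
  · -- B's scan hit a slice line → A finds a keyword on the matching window line
    rintro ⟨s, hs, hscan⟩
    have := pvLineScan s
    rw [Bool.eq_iff_iff] at this
    simp only [List.any_eq_true] at this
    rcases this.mp hscan with ⟨k, hk, hin⟩
    rcases (pvMemSlice lines p q s).mp hs with ⟨j, hjq, hpj, hget⟩
    refine ⟨(((p + j : Nat) : Int) + 1, safe_line_py lines (((p + j : Nat) : Int) + 1)),
      List.mem_map.mpr ⟨((p + j : Nat) : Int) + 1,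
        PySem.List.mem_pyRange_one.mpr ⟨by omega, by omega⟩, rfl⟩, k, hk, ?_⟩
    dsimp only
    rw [pvSafeLineGet lines _ (p + j) (by push_cast; omega) hpj (by omega) (by omega), hget]
    exact hin
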